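-- pv_equiv track=rewrite | github.com/Tzeke000/Ava-Agent-v2 | brain/mirix_taxonomy.py | classify_by_tags
-- ===== SOURCE A (Python) =====
-- from enum import Enum
-- from typing import Iterable
--
-- class MemoryType(str, Enum):
--     """Six MIRIX memory types. str-subclass so they serialize cleanly."""
--     CORE = "core"
--     EPISODIC = "episodic"
--     SEMANTIC = "semantic"
--     PROCEDURAL = "procedural"
--     RESOURCE = "resource"
--     KNOWLEDGE_VAULT = "knowledge_vault"
--
-- def classify_by_tags(tags: Iterable[str] | None) -> MemoryType | None:
--     """Return MemoryType from tags. Specific tag-name conventions: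
--
--     - 'verbatim' / 'sensitive' / 'phone' / 'address' → KNOWLEDGE_VAULT
--     - 'procedure' / 'skill' / 'recipe' → PROCEDURAL
--     - 'file' / 'image' / 'document' → RESOURCE
--     - 'preference' / 'identity' / 'profile' → CORE
--     - 'episode' / 'conversation' / 'event' → EPISODIC
--     - 'concept' / 'fact' / 'knowledge' → SEMANTIC
--     """
--     if not tags:
--         return None
--     tag_set = {str(t).strip().lower() for t in tags if t}
--     if tag_set & {"verbatim", "sensitive", "phone", "address", "credential", "ssn", "exact_quote"}:
--         return MemoryType.KNOWLEDGE_VAULT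
--     if tag_set & {"procedure", "skill", "recipe", "how_to", "compound_action"}:
--         return MemoryType.PROCEDURAL
--     if tag_set & {"file", "image", "document", "screenshot", "media"}:
--         return MemoryType.RESOURCE
--     if tag_set & {"preference", "identity", "profile", "trust", "impression"}:
--         return MemoryType.CORE
--     if tag_set & {"episode", "conversation", "event", "snapshot", "occurrence"}:
--         return MemoryType.EPISODIC
--     if tag_set & {"concept", "fact", "knowledge", "definition", "general"}:
--         return MemoryType.SEMANTIC
--     return None
-- ===== SOURCE B (Python) =====
-- from enum import Enum
-- from typing import Iterable
--
-- class MemoryType(str, Enum):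
--     CORE = "core"
--     EPISODIC = "episodic"
--     SEMANTIC = "semantic"
--     PROCEDURAL = "procedural"
--     RESOURCE = "resource"
--     KNOWLEDGE_VAULT = "knowledge_vault"
--
-- _NAMES = [
--     MemoryType.KNOWLEDGE_VAULT,
--     MemoryType.PROCEDURAL,
--     MemoryType.RESOURCE,
--     MemoryType.CORE,
--     MemoryType.EPISODIC,
--     MemoryType.SEMANTIC,
-- ]
--
-- _WORDS = [
--     ("verbatim", "sensitive", "phone", "address", "credential", "ssn", "exact_quote"),
--     ("procedure", "skill", "recipe", "how_to", "compound_action"),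
--     ("file", "image", "document", "screenshot", "media"),
--     ("preference", "identity", "profile", "trust", "impression"),
--     ("episode", "conversation", "event", "snapshot", "occurrence"),
--     ("concept", "fact", "knowledge", "definition", "general"),
-- ]
--
-- _RANK = {w: r for r, ws in enumerate(_WORDS) for w in ws}
--
-- def classify_by_tags(tags: Iterable[str] | None) -> MemoryType | None:
--     if not tags:
--         return None
--     best = 6
--     for t in tags:
--         if t:
--             best = min(best, _RANK.get(str(t).strip().lower(), 6))
--     return None if best == 6 else _NAMES[best]
-- ===== Notes on version B (the rewrite author's own statement) =====
-- stated objective: simpler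
-- what changed: Replaced the six ordered set-intersection checks with a single precomputed tag-to-rank dictionary and one min-rank pass over the tags, mapping the smallest rank found back to its memory type.
import Mathlib
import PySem

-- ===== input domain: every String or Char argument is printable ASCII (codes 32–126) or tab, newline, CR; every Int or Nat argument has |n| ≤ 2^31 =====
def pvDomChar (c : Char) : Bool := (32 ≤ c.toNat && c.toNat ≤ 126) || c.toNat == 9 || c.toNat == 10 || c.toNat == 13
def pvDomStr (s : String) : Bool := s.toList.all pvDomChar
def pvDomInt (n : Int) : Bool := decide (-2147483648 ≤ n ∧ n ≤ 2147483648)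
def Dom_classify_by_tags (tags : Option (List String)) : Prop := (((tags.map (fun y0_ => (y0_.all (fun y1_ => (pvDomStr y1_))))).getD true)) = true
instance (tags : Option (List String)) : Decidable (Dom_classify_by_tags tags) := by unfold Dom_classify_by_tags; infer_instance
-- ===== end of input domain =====

-- B replaces the six ordered set-intersection checks by one precomputed tag→rank
-- dictionary and a single min-rank pass over the tags (objective: simpler).

-- ===== PORT A =====
-- the six tag sets of A, in A's priority order
def pvCat0 : List String := ["verbatim","sensitive","phone","address","credential","ssn","exact_quote"]
def pvCat1 : List String := ["procedure","skill","recipe","how_to","compound_action"]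
def pvCat2 : List String := ["file","image","document","screenshot","media"]
def pvCat3 : List String := ["preference","identity","profile","trust","impression"]
def pvCat4 : List String := ["episode","conversation","event","snapshot","occurrence"]
def pvCat5 : List String := ["concept","fact","knowledge","definition","general"]

def classify_by_tags (tags : Option (List String)) : Option String :=
  match tags with
  | none => none
  | some l =>
    if l = [] then none else
    let tagSet : PySem.Set String :=
      PySem.Set.ofList ((l.filter (fun t => !(t == ""))).map
        (fun t => PySem.Str.lower (PySem.Str.strip t)))
    if PySem.Set.inter tagSet pvCat0 ≠ [] then
      some "knowledge_vault"
    else if PySem.Set.inter tagSet pvCat1 ≠ [] then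
      some "procedural"
    else if PySem.Set.inter tagSet pvCat2 ≠ [] then
      some "resource"
    else if PySem.Set.inter tagSet pvCat3 ≠ [] then
      some "core"
    else if PySem.Set.inter tagSet pvCat4 ≠ [] then
      some "episodic"
    else if PySem.Set.inter tagSet pvCat5 ≠ [] then
      some "semantic"
    else none

-- ===== PORT B =====
def pvNames : List String :=
  ["knowledge_vault","procedural","resource","core","episodic","semantic"]

def pvRank : PySem.Dict String Int := PySem.Dict.ofList
  [("verbatim",0),("sensitive",0),("phone",0),("address",0),("credential",0),("ssn",0),("exact_quote",0),
   ("procedure",1),("skill",1),("recipe",1),("how_to",1),("compound_action",1),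
   ("file",2),("image",2),("document",2),("screenshot",2),("media",2),
   ("preference",3),("identity",3),("profile",3),("trust",3),("impression",3),
   ("episode",4),("conversation",4),("event",4),("snapshot",4),("occurrence",4),
   ("concept",5),("fact",5),("knowledge",5),("definition",5),("general",5)]

def classify_by_tags_alt (tags : Option (List String)) : Option String :=
  match tags with
  | none => none
  | some l =>
    if l = [] then none else
    let best : Int := l.foldl
      (fun best t =>
        if !(t == "") then
          min best (pvRank.getD (PySem.Str.lower (PySem.Str.strip t)) 6)
        else best) 6
    if best = 6 then none else PySem.List.pyGet? pvNames best

-- ===== PRECONDITION & SPEC =====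
def Spec_classify_by_tags (tags : Option (List String)) (out : Option String) : Prop := out = classify_by_tags_alt tags
instance (tags : Option (List String)) (out : Option String) : Decidable (Spec_classify_by_tags tags out) := by unfold Spec_classify_by_tags; infer_instance

-- ===== CLAIM (what is proved, stated in full; the proofs are below) =====
def Claim_equal_classify_by_tags : Prop := ∀ (tags : Option (List String)), Dom_classify_by_tags tags → Spec_classify_by_tags tags (classify_by_tags tags)

-- ===== LEMMAS AND PROOFS =====

-- normalization applied to each tag (proof-side abbreviation)
def pvNorm (t : String) : String := PySem.Str.lower (PySem.Str.strip t)

-- does tag t (nonempty, normalized) land in category word list c?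
def pvHit (c : List String) (t : String) : Bool := !(t == "") && c.contains (pvNorm t)

-- the first-true-index value of the six booleans, as A's if-chain computes it
def pvChain (b0 b1 b2 b3 b4 b5 : Bool) : Int :=
  if b0 then 0 else if b1 then 1 else if b2 then 2 else if b3 then 3 else if b4 then 4 else if b5 then 5 else 6


lemma pvRank_eq : pvRank = PySem.Dict.mk
  [("verbatim",0),("sensitive",0),("phone",0),("address",0),("credential",0),("ssn",0),("exact_quote",0),
   ("procedure",1),("skill",1),("recipe",1),("how_to",1),("compound_action",1),
   ("file",2),("image",2),("document",2),("screenshot",2),("media",2),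
   ("preference",3),("identity",3),("profile",3),("trust",3),("impression",3),
   ("episode",4),("conversation",4),("event",4),("snapshot",4),("occurrence",4),
   ("concept",5),("fact",5),("knowledge",5),("definition",5),("general",5)] := by decide

-- the reverse index agrees pointwise with the six ordered membership tests
lemma rank_eq (s : String) :
    pvRank.getD s 6 =
    pvChain (pvCat0.contains s) (pvCat1.contains s) (pvCat2.contains s)
            (pvCat3.contains s) (pvCat4.contains s) (pvCat5.contains s) := by
  rw [pvRank_eq]
  by_cases hm : s ∈ (["verbatim","sensitive","phone","address","credential","ssn","exact_quote",
     "procedure","skill","recipe","how_to","compound_action",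
     "file","image","document","screenshot","media",
     "preference","identity","profile","trust","impression",
     "episode","conversation","event","snapshot","occurrence",
     "concept","fact","knowledge","definition","general"] : List String)
  · simp only [List.mem_cons, List.not_mem_nil, or_false] at hm
    rcases hm with rfl|rfl|rfl|rfl|rfl|rfl|rfl|rfl|rfl|rfl|rfl|rfl|rfl|rfl|rfl|rfl|rfl|rfl|rfl|rfl|rfl|rfl|rfl|rfl|rfl|rfl|rfl|rfl|rfl|rfl|rfl|rfl <;> decide
  · simp only [List.mem_cons, List.not_mem_nil, or_false, not_or] at hm
    obtain ⟨h1,h2,h3,h4,h5,h6,h7,h8,h9,h10,h11,h12,h13,h14,h15,h16,h17,h18,h19,h20,h21,h22,h23,h24,h25,h26,h27,h28,h29,h30,h31,h32⟩ := hm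
    simp only [pvChain, pvCat0, pvCat1, pvCat2, pvCat3, pvCat4, pvCat5,
      PySem.Dict.getD, PySem.Dict.get?_mk_cons, List.contains_eq_mem, List.mem_cons,
      List.not_mem_nil, or_false, beq_iff_eq, decide_eq_true_eq,
      h1,h2,h3,h4,h5,h6,h7,h8,h9,h10,h11,h12,h13,h14,h15,h16,h17,h18,h19,h20,h21,h22,h23,h24,h25,h26,h27,h28,h29,h30,h31,h32,
      Ne.symm h1,Ne.symm h2,Ne.symm h3,Ne.symm h4,Ne.symm h5,Ne.symm h6,Ne.symm h7,Ne.symm h8,Ne.symm h9,Ne.symm h10,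
      Ne.symm h11,Ne.symm h12,Ne.symm h13,Ne.symm h14,Ne.symm h15,Ne.symm h16,Ne.symm h17,Ne.symm h18,Ne.symm h19,Ne.symm h20,
      Ne.symm h21,Ne.symm h22,Ne.symm h23,Ne.symm h24,Ne.symm h25,Ne.symm h26,Ne.symm h27,Ne.symm h28,Ne.symm h29,Ne.symm h30,
      Ne.symm h31,Ne.symm h32]
    rfl

lemma chain_or (a0 a1 a2 a3 a4 a5 b0 b1 b2 b3 b4 b5 : Bool) :
    pvChain (a0||b0) (a1||b1) (a2||b2) (a3||b3) (a4||b4) (a5||b5)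
      = min (pvChain a0 a1 a2 a3 a4 a5) (pvChain b0 b1 b2 b3 b4 b5) := by
  revert a0 a1 a2 a3 a4 a5 b0 b1 b2 b3 b4 b5; decide

-- B's fold step
def pvStep (best : Int) (t : String) : Int :=
  if !(t == "") then min best (pvRank.getD (PySem.Str.lower (PySem.Str.strip t)) 6) else best

lemma foldl_pvStep_min (l : List String) (a b : Int) :
    l.foldl pvStep (min a b) = min a (l.foldl pvStep b) := by
  induction l generalizing a b with
  | nil => rfl
  | cons t l ih =>
    have h : pvStep (min a b) t = min a (pvStep b t) := by
      unfold pvStep; split_ifs <;> simp [min_assoc]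
    simp only [List.foldl, h, ih]

lemma pvStep_six (t : String) :
    pvStep 6 t = min (pvChain (pvHit pvCat0 t) (pvHit pvCat1 t) (pvHit pvCat2 t)
      (pvHit pvCat3 t) (pvHit pvCat4 t) (pvHit pvCat5 t)) 6 := by
  unfold pvStep pvHit
  by_cases ht : t = ""
  · subst ht; rfl
  · have hb : (t == "") = false := by simp [ht]
    simp [hb, show PySem.Str.lower (PySem.Str.strip t) = pvNorm t from rfl,
      rank_eq (pvNorm t), min_comm]

-- the single min-rank pass computes the first-true-index of the six category flags
lemma fold_eq_chain (l : List String) :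
    l.foldl pvStep 6 =
    pvChain (l.any (pvHit pvCat0)) (l.any (pvHit pvCat1)) (l.any (pvHit pvCat2))
            (l.any (pvHit pvCat3)) (l.any (pvHit pvCat4)) (l.any (pvHit pvCat5)) := by
  induction l with
  | nil => rfl
  | cons t l ih =>
    calc (t :: l).foldl pvStep 6 = l.foldl pvStep (pvStep 6 t) := rfl
      _ = min (pvChain (pvHit pvCat0 t) (pvHit pvCat1 t) (pvHit pvCat2 t)
            (pvHit pvCat3 t) (pvHit pvCat4 t) (pvHit pvCat5 t)) (l.foldl pvStep 6) := by
            rw [pvStep_six, foldl_pvStep_min]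
      _ = _ := by rw [ih, ← chain_or]; simp [List.any_cons]

-- A's i-th intersection test is the i-th category flag
lemma inter_ne_iff (l : List String) (c : List String) :
    (PySem.Set.inter
      (PySem.Set.ofList ((l.filter (fun t => !(t == ""))).map
        (fun t => PySem.Str.lower (PySem.Str.strip t)))) c ≠ []) ↔ l.any (pvHit c) = true := by
  rw [show ∀ (x : List String), (x ≠ [] ↔ ∃ a, a ∈ x) from fun x => by
    rw [← List.isEmpty_eq_false_iff_exists_mem]; simp]
  simp only [PySem.Set.mem_inter, PySem.Set.mem_ofList, List.mem_map, List.mem_filter,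
    List.any_eq_true, pvHit, pvNorm, Bool.and_eq_true, Bool.not_eq_true', beq_eq_false_iff_ne]
  constructor
  · rintro ⟨x, ⟨t, ⟨htl, hne⟩, rfl⟩, hc⟩
    exact ⟨t, htl, hne, by simpa using hc⟩
  · rintro ⟨t, htl, hne, hc⟩
    exact ⟨_, ⟨t, ⟨htl, hne⟩, rfl⟩, by simpa using hc⟩

-- ===== VERDICT (by name: the statement is the Claim_ definition above) =====
theorem classify_by_tags_spec : Claim_equal_classify_by_tags := by
  intro tags _
  unfold Spec_classify_by_tags classify_by_tags classify_by_tags_alt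
  match tags with
  | none => rfl
  | some l =>
    by_cases hl : l = []
    · simp [hl]
    · simp only [if_neg hl]
      rw [show (fun (best : Int) (t : String) =>
            if !(t == "") then min best (pvRank.getD (PySem.Str.lower (PySem.Str.strip t)) 6)
            else best) = pvStep from rfl]
      rw [fold_eq_chain]
      simp only [inter_ne_iff l pvCat0, inter_ne_iff l pvCat1, inter_ne_iff l pvCat2,
        inter_ne_iff l pvCat3, inter_ne_iff l pvCat4, inter_ne_iff l pvCat5]
      generalize l.any (pvHit pvCat0) = b0
      generalize l.any (pvHit pvCat1) = b1
      generalize l.any (pvHit pvCat2) = b2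
      generalize l.any (pvHit pvCat3) = b3
      generalize l.any (pvHit pvCat4) = b4
      generalize l.any (pvHit pvCat5) = b5
      revert b0 b1 b2 b3 b4 b5; decide
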